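-- pv_equiv track=rewrite | github.com/hiteshpindikanti/Coding_Questions | odd_coin.py | get_odd_coin_index
-- ===== SOURCE A (Python) =====
-- def scale(coin_set1: list, coin_set2: list) -> int:
--     coin_set1_weight = sum(coin_set1)
--     coin_set2_weight = sum(coin_set2)
--     if coin_set1_weight < coin_set2_weight:
--         return -1
--     elif coin_set1_weight > coin_set2_weight:
--         return 1
--     else:
--         return 0
--
-- def get_odd_coin_index(coins: list) -> int:
--     if len(coins) & 1:
--         coins.pop(-1)
--     mid_index = len(coins) // 2
--     scale_reading = scale(coins[:mid_index], coins[mid_index:])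
--     if scale_reading == -1:
--         odd_coin_index = get_odd_coin_index(coins[:mid_index])
--     elif scale_reading == 1:
--         odd_coin_index = mid_index + get_odd_coin_index(coins[mid_index:])
--     else:
--         odd_coin_index = len(coins)
--     return odd_coin_index
-- ===== SOURCE B (Python) =====
-- def _adjust(lo, hi):
--     # drop the last coin of the current window if its size is odd
--     n = hi - lo
--     if n & 1:
--         return hi - 1, n - 1
--     return hi, n
--
-- def _weigh(coins, a, b):
--     return sum(coins[a:b])
--
-- def get_odd_coin_index(coins: list) -> int:
--     # Iterative re-implementation: same single top-level pop, then an
--     # index-window loop with an offset accumulator instead of recursion.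
--     if len(coins) & 1:
--         coins.pop(-1)
--     acc = 0
--     lo, hi = 0, len(coins)
--     while True:
--         hi, n = _adjust(lo, hi)
--         mid = lo + n // 2
--         left = _weigh(coins, lo, mid)
--         right = _weigh(coins, mid, hi)
--         if left < right:
--             hi = mid
--         elif left > right:
--             acc += mid - lo
--             lo = mid
--         else:
--             return acc + (hi - lo)
-- ===== Notes on version B (the rewrite author's own statement) =====
-- stated objective: alternative
-- what changed: Replaces A's recursion on freshly-sliced sublists with an iterative loop over index windows (lo, hi) into the unchanged list, carrying an offset accumulator instead of adding offsets on the way back up.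
import Mathlib
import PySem

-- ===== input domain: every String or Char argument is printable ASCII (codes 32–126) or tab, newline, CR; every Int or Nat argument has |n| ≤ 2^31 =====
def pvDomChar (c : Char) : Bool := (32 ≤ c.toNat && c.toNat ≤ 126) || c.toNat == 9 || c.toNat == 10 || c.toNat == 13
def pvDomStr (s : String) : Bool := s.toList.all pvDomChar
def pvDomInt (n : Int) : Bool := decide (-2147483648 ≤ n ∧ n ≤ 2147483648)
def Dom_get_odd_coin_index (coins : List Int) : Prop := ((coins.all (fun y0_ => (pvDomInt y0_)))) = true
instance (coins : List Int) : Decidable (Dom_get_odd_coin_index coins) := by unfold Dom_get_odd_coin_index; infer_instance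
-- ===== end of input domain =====

-- B replaces A's recursive halving with an iterative index-window loop (lo, hi, offset
-- accumulator) over the unchanged list; objective: alternative decomposition, same cost.
-- A mutates its argument (a single top-level pop on odd length); B performs the same
-- mutation; the equivalence proved here is about the return value.

-- ===== PORT A =====
-- scale: exact transliteration of the helper.
def scale (coin_set1 : List Int) (coin_set2 : List Int) : Int :=
  if coin_set1.sum < coin_set2.sum then -1
  else if coin_set1.sum > coin_set2.sum then 1
  else 0

-- termination facts for the port's recursion (cited by name in decreasing_by)
lemma pvTermA1 {coins0 c : List Int} (hle : c.length ≤ coins0.length)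
    (h : scale (c.take (c.length / 2)) (c.drop (c.length / 2)) = -1) :
    (c.take (c.length / 2)).length < coins0.length := by
  rcases Nat.eq_zero_or_pos c.length with h0 | h0
  · exfalso
    have hc : c = [] := List.eq_nil_of_length_eq_zero h0
    rw [hc] at h; simp [scale] at h
  · have := Nat.div_lt_self h0 (by norm_num : 1 < 2)
    simp only [List.length_take]; omega

lemma pvTermA2 {coins0 c : List Int} (hle : c.length ≤ coins0.length)
    (hev : c.length % 2 = 0)
    (h : scale (c.take (c.length / 2)) (c.drop (c.length / 2)) = 1) :
    (c.drop (c.length / 2)).length < coins0.length := by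
  rcases Nat.eq_zero_or_pos c.length with h0 | h0
  · exfalso
    have hc : c = [] := List.eq_nil_of_length_eq_zero h0
    rw [hc] at h; simp [scale] at h
  · have := Nat.div_lt_self h0 (by norm_num : 1 < 2)
    simp only [List.length_drop]; omega

lemma pvCoinsLen (coins0 : List Int) :
    (if _h : coins0.length % 2 = 1 then coins0.dropLast else coins0).length ≤ coins0.length := by
  by_cases hp : coins0.length % 2 = 1
  · simp only [dif_pos hp, List.length_dropLast]; omega
  · simp only [dif_neg hp]; omega

lemma pvCoinsEven (coins0 : List Int) :
    (if _h : coins0.length % 2 = 1 then coins0.dropLast else coins0).length % 2 = 0 := by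
  by_cases hp : coins0.length % 2 = 1
  · simp only [dif_pos hp, List.length_dropLast]; omega
  · simp only [dif_neg hp]; omega

-- coins.pop(-1) on an odd-length (hence nonempty) list is dropLast; the slices
-- coins[:mid_index] and coins[mid_index:] with 0 ≤ mid_index ≤ len are take/drop (exact here).
def get_odd_coin_index (coins0 : List Int) : Int :=
  let coins := if coins0.length % 2 = 1 then coins0.dropLast else coins0
  let mid_index := coins.length / 2
  if h1 : scale (coins.take mid_index) (coins.drop mid_index) = -1 then
    get_odd_coin_index (coins.take mid_index)
  else if h2 : scale (coins.take mid_index) (coins.drop mid_index) = 1 then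
    (mid_index : Int) + get_odd_coin_index (coins.drop mid_index)
  else
    (coins.length : Int)
termination_by coins0.length
decreasing_by
  · exact pvTermA1 (pvCoinsLen coins0) h1
  · exact pvTermA2 (pvCoinsLen coins0) (pvCoinsEven coins0) h2

-- ===== PORT B =====
-- slice coins[a:b] with b ≤ a is empty
lemma slice_nil (l : List Int) (a b : Nat) (h : b ≤ a) : (List.take b l).drop a = [] := by
  apply List.drop_eq_nil_of_le
  simp only [List.length_take]
  omega

-- _adjust(lo, hi): drop the last index of the window if its size is odd (returns new hi, n)
def pvAdjust (lo hi : Nat) : Nat × Nat :=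
  let n := hi - lo
  if n % 2 = 1 then (hi - 1, n - 1) else (hi, n)

-- _weigh(coins, a, b) = sum(coins[a:b]); the slice with 0 ≤ a ≤ b ≤ len is (take b).drop a (exact here)
def pvWeigh (coins : List Int) (a b : Nat) : Int := ((coins.take b).drop a).sum

-- termination facts for the loop (cited by name in decreasing_by)
lemma pvTermB0 {coins : List Int} {lo hi : Nat}
    (hne : ¬ pvWeigh coins lo (lo + (pvAdjust lo hi).2 / 2) =
      pvWeigh coins (lo + (pvAdjust lo hi).2 / 2) (pvAdjust lo hi).1) :
    (pvAdjust lo hi).2 ≠ 0 := by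
  intro h0
  apply hne
  unfold pvWeigh
  rw [h0]
  unfold pvAdjust at h0 ⊢
  by_cases hp : (hi - lo) % 2 = 1
  · simp only [if_pos hp] at h0 ⊢
    rw [slice_nil coins lo (lo + 0 / 2) (by omega),
      slice_nil coins (lo + 0 / 2) (hi - 1) (by omega)]
  · simp only [if_neg hp] at h0 ⊢
    rw [slice_nil coins lo (lo + 0 / 2) (by omega),
      slice_nil coins (lo + 0 / 2) hi (by omega)]

lemma pvTermB1 {coins : List Int} {lo hi : Nat}
    (hlt : pvWeigh coins lo (lo + (pvAdjust lo hi).2 / 2) <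
      pvWeigh coins (lo + (pvAdjust lo hi).2 / 2) (pvAdjust lo hi).1) :
    lo + (pvAdjust lo hi).2 / 2 - lo < hi - lo := by
  have h0 := pvTermB0 (coins := coins) (lo := lo) (hi := hi) (by omega)
  unfold pvAdjust at h0 ⊢
  by_cases hp : (hi - lo) % 2 = 1 <;>
    [simp only [if_pos hp] at h0 ⊢; simp only [if_neg hp] at h0 ⊢] <;> omega

lemma pvTermB2 {coins : List Int} {lo hi : Nat}
    (hgt : pvWeigh coins lo (lo + (pvAdjust lo hi).2 / 2) >
      pvWeigh coins (lo + (pvAdjust lo hi).2 / 2) (pvAdjust lo hi).1) :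
    (pvAdjust lo hi).1 - (lo + (pvAdjust lo hi).2 / 2) < hi - lo := by
  have h0 := pvTermB0 (coins := coins) (lo := lo) (hi := hi) (by omega)
  unfold pvAdjust at h0 ⊢
  by_cases hp : (hi - lo) % 2 = 1 <;>
    [simp only [if_pos hp] at h0 ⊢; simp only [if_neg hp] at h0 ⊢] <;> omega

-- The while-True loop of Source B with state (lo, hi, acc)
def bLoop (coins : List Int) (lo hi : Nat) (acc : Int) : Int :=
  let hi' := (pvAdjust lo hi).1
  let n := (pvAdjust lo hi).2
  let mid := lo + n / 2
  let left := pvWeigh coins lo mid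
  let right := pvWeigh coins mid hi'
  if hlt : left < right then
    bLoop coins lo mid acc
  else if hgt : left > right then
    bLoop coins mid hi' (acc + ((mid : Int) - (lo : Int)))
  else
    acc + ((hi' : Int) - (lo : Int))
termination_by hi - lo
decreasing_by
  · exact pvTermB1 hlt
  · exact pvTermB2 hgt

def get_odd_coin_index_alt (coins : List Int) : Int :=
  let c := if coins.length % 2 = 1 then coins.dropLast else coins
  bLoop c 0 c.length 0

-- ===== PRECONDITION & SPEC =====
def Spec_get_odd_coin_index (coins : List Int) (out : Int) : Prop := out = get_odd_coin_index_alt coins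
instance (coins : List Int) (out : Int) : Decidable (Spec_get_odd_coin_index coins out) := by unfold Spec_get_odd_coin_index; infer_instance

-- ===== CLAIM (what is proved, stated in full; the proofs are below) =====
def Claim_equal_get_odd_coin_index : Prop := ∀ (coins : List Int), Dom_get_odd_coin_index coins → Spec_get_odd_coin_index coins (get_odd_coin_index coins)

-- ===== LEMMAS AND PROOFS =====
lemma A_nil : get_odd_coin_index [] = 0 := by
  rw [get_odd_coin_index.eq_def]
  norm_num [scale]

-- length of the slice coins[lo:hi]
lemma sub_len (coins : List Int) (lo hi : Nat) (hhl : hi ≤ coins.length) :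
    ((coins.drop lo).take (hi - lo)).length = hi - lo := by
  simp only [List.length_take, List.length_drop]
  omega

lemma dropLast_slice (coins : List Int) (lo hi : Nat) (hhl : hi ≤ coins.length) :
    ((coins.drop lo).take (hi - lo)).dropLast = (coins.drop lo).take (hi - 1 - lo) := by
  rw [List.dropLast_eq_take, sub_len coins lo hi hhl, List.take_take]
  congr 1
  omega

lemma bLoop_odd (coins : List Int) (lo hi : Nat) (acc : Int) (hp : (hi - lo) % 2 = 1) :
    bLoop coins lo hi acc = bLoop coins lo (hi - 1) acc := by
  have hadj : pvAdjust lo hi = pvAdjust lo (hi - 1) := by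
    unfold pvAdjust
    simp only [if_pos hp, if_neg (by omega : ¬ (hi - 1 - lo) % 2 = 1)]
    have e : hi - lo - 1 = hi - 1 - lo := by omega
    rw [e]
  conv_lhs => rw [bLoop.eq_def]
  conv_rhs => rw [bLoop.eq_def]
  rw [hadj]

lemma A_odd (l : List Int) (hp : l.length % 2 = 1) :
    get_odd_coin_index l = get_odd_coin_index l.dropLast := by
  conv_lhs => rw [get_odd_coin_index.eq_def]
  conv_rhs => rw [get_odd_coin_index.eq_def]
  have h2 : ¬(l.dropLast.length % 2 = 1) := by
    simp only [List.length_dropLast]; omega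
  simp only [if_pos hp, if_neg h2]

lemma scale_eq_neg1 (a b : List Int) : (scale a b = -1) ↔ a.sum < b.sum := by
  unfold scale; split_ifs <;> simp <;> omega

lemma scale_eq_one (a b : List Int) : (scale a b = 1) ↔ b.sum < a.sum := by
  unfold scale; split_ifs <;> simp <;> omega

lemma bLoop_eq_A (k : Nat) : ∀ (coins : List Int) (lo hi : Nat) (acc : Int),
    lo ≤ hi → hi ≤ coins.length → hi - lo ≤ k →
    bLoop coins lo hi acc = acc + get_odd_coin_index ((coins.drop lo).take (hi - lo)) := by
  induction k with
  | zero =>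
    intro coins lo hi acc hlh hhl hk
    have hhi : hi = lo := by omega
    subst hhi
    rw [bLoop.eq_def]
    simp only [pvAdjust, pvWeigh, Nat.sub_self, List.take_zero, A_nil]
    norm_num
  | succ k ih =>
    intro coins lo hi acc hlh hhl hk
    by_cases hn : hi - lo = 0
    · exact ih coins lo hi acc hlh hhl (by omega)
    by_cases hp : (hi - lo) % 2 = 1
    · -- odd window: one bLoop iteration only shrinks hi by one; A drops the last element
      rw [bLoop_odd coins lo hi acc hp]
      rw [A_odd ((coins.drop lo).take (hi - lo)) (by rw [sub_len coins lo hi hhl]; exact hp)]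
      rw [dropLast_slice coins lo hi hhl]
      have := ih coins lo (hi - 1) acc (by omega) (by omega) (by omega)
      rw [this]
    · -- even window
      have hlen : hi - lo ≠ 0 := hn
      have hsublen : ((coins.drop lo).take (hi - lo)).length = hi - lo := sub_len coins lo hi hhl
      rw [bLoop.eq_def, get_odd_coin_index.eq_def]
      simp only [pvAdjust, pvWeigh, if_neg hp, hsublen]
      simp only [List.drop_take, List.drop_drop, List.take_take]
      have e1 : lo + (hi - lo) / 2 - lo = (hi - lo) / 2 := by omega
      have e2 : hi - (lo + (hi - lo) / 2) = hi - lo - (hi - lo) / 2 := by omega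
      have e3 : min ((hi - lo) / 2) (hi - lo) = (hi - lo) / 2 := by omega
      rw [e1, e2, e3]
      rcases lt_trichotomy ((coins.drop lo).take ((hi - lo) / 2)).sum
          ((coins.drop (lo + (hi - lo) / 2)).take (hi - lo - (hi - lo) / 2)).sum with h | h | h
      · rw [dif_pos h, dif_pos ((scale_eq_neg1 _ _).mpr h)]
        rw [ih coins lo (lo + (hi - lo) / 2) acc (by omega) (by omega) (by omega)]
        rw [e1]
      · have hs1 : ¬ (scale ((coins.drop lo).take ((hi - lo) / 2))
            ((coins.drop (lo + (hi - lo) / 2)).take (hi - lo - (hi - lo) / 2)) = -1) := by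
          rw [scale_eq_neg1]; omega
        have hs2 : ¬ (scale ((coins.drop lo).take ((hi - lo) / 2))
            ((coins.drop (lo + (hi - lo) / 2)).take (hi - lo - (hi - lo) / 2)) = 1) := by
          rw [scale_eq_one]; omega
        rw [dif_neg (by omega : ¬ _ < _), dif_neg (by omega : ¬ _ > _), dif_neg hs1, dif_neg hs2]
        omega
      · have hs1 : ¬ (scale ((coins.drop lo).take ((hi - lo) / 2))
            ((coins.drop (lo + (hi - lo) / 2)).take (hi - lo - (hi - lo) / 2)) = -1) := by
          rw [scale_eq_neg1]; omega
        rw [dif_neg (by omega : ¬ _ < _), dif_pos (by omega : _ > _), dif_neg hs1,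
          dif_pos ((scale_eq_one _ _).mpr h)]
        rw [ih coins (lo + (hi - lo) / 2) hi (acc + ((lo + (hi - lo) / 2 : Nat) - (lo : Int)))
          (by omega) hhl (by omega)]
        rw [e2]
        push_cast
        ring

lemma alt_eq (coins : List Int) : get_odd_coin_index_alt coins = get_odd_coin_index coins := by
  unfold get_odd_coin_index_alt
  by_cases hp : coins.length % 2 = 1
  · simp only [if_pos hp]
    rw [bLoop_eq_A coins.dropLast.length coins.dropLast 0 coins.dropLast.length 0 (by omega)
      le_rfl (by omega)]
    rw [A_odd coins hp]
    simp only [List.drop_zero, Nat.sub_zero, List.take_length]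
    ring
  · simp only [if_neg hp]
    rw [bLoop_eq_A coins.length coins 0 coins.length 0 (by omega) le_rfl (by omega)]
    simp

-- ===== VERDICT (by name: the statement is the Claim_ definition above) =====
theorem get_odd_coin_index_spec : Claim_equal_get_odd_coin_index := by
  intro coins _
  unfold Spec_get_odd_coin_index
  exact (alt_eq coins).symm
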